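-- pv_equiv track=rewrite | github.com/penguinwu/oss-model-graph-break-corpus | tools/update_corpus.py | _classify_new_models
-- ===== SOURCE A (Python) =====
-- _HF_SUFFIXES = sorted([
--     "ForCausalLM", "ForConditionalGeneration", "ForSequenceClassification",
--     "ForTokenClassification", "ForQuestionAnswering", "ForMaskedLM",
--     "ForMultipleChoice", "ForPreTraining", "ForImageClassification",
--     "LMHeadModel", "DoubleHeadsModel", "WithLMHeadModel",
--     "EncoderModel", "DecoderModel", "TextModel", "VisionModel",
--     "AudioModel", "BaseModel", "Model",
-- ], key=len, reverse=True)
--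
-- def _model_family(name):
--     """Extract model family from a HF class name by stripping task suffixes.
--
--     E.g. 'LlamaForCausalLM' → 'Llama', 'Gemma3Model' → 'Gemma3'.
--     """
--     for suffix in _HF_SUFFIXES:
--         if name.endswith(suffix) and len(name) > len(suffix):
--             return name[:-len(suffix)]
--     return name
--
-- def _classify_new_models(new_model_entries, existing_model_names):
--     """Split new model entries into new families vs new configurations.
--
--     Returns (new_families, new_configs) where each is a list of changelog entries.
--     A 'new family' is a model whose family name doesn't appear among existing models.
--     A 'new config' is a variant (e.g. ForCausalLM) of an already-present family.
--     """
--     existing_families = {_model_family(n) for n in existing_model_names}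
--
--     # Deduplicate: a model can appear twice (eval + train); classify once per name
--     seen = set()
--     new_families = []
--     new_configs = []
--     for entry in sorted(new_model_entries, key=lambda x: x["name"]):
--         name = entry["name"]
--         if name in seen:
--             continue
--         seen.add(name)
--         family = _model_family(name)
--         if family in existing_families:
--             new_configs.append(entry)
--         else:
--             new_families.append(entry)
--             existing_families.add(family)  # subsequent variants of this family → config
--     return new_families, new_configs
-- ===== SOURCE B (Python) =====
-- _HF_SUFFIXES = sorted([
--     "ForCausalLM", "ForConditionalGeneration", "ForSequenceClassification",
--     "ForTokenClassification", "ForQuestionAnswering", "ForMaskedLM",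
--     "ForMultipleChoice", "ForPreTraining", "ForImageClassification",
--     "LMHeadModel", "DoubleHeadsModel", "WithLMHeadModel",
--     "EncoderModel", "DecoderModel", "TextModel", "VisionModel",
--     "AudioModel", "BaseModel", "Model",
-- ], key=len, reverse=True)
--
-- def _model_family(name):
--     for suffix in _HF_SUFFIXES:
--         if name.endswith(suffix) and len(name) > len(suffix):
--             return name[:-len(suffix)]
--     return name
--
-- def _classify_new_models(new_model_entries, existing_model_names):
--     """Split new model entries into new families vs new configurations.
--
--     Decomposition: deduplicate via a dict keyed by name, precompute a table
--     mapping each family to the name of its first deduplicated entry, then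
--     classify every entry with two stateless comprehensions.
--     """
--     existing_families = {_model_family(n) for n in existing_model_names}
--     by_name = {}
--     for entry in sorted(new_model_entries, key=lambda x: x["name"]):
--         by_name.setdefault(entry["name"], entry)
--     entries = list(by_name.values())
--     first_of_family = {}
--     for entry in entries:
--         first_of_family.setdefault(_model_family(entry["name"]), entry["name"])
--     new_families = [e for e in entries
--                     if _model_family(e["name"]) not in existing_families
--                     and first_of_family[_model_family(e["name"])] == e["name"]]
--     new_configs = [e for e in entries
--                    if _model_family(e["name"]) in existing_families
--                    or first_of_family[_model_family(e["name"])] != e["name"]]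
--     return new_families, new_configs
-- ===== Notes on version B (the rewrite author's own statement) =====
-- stated objective: alternative
-- what changed: A classifies in one pass over the sorted entries while mutating a seen-names set and the existing-families set; B instead deduplicates via an insertion-ordered dict, precomputes a first-of-family table, and classifies with two stateless list comprehensions.
import Mathlib
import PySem

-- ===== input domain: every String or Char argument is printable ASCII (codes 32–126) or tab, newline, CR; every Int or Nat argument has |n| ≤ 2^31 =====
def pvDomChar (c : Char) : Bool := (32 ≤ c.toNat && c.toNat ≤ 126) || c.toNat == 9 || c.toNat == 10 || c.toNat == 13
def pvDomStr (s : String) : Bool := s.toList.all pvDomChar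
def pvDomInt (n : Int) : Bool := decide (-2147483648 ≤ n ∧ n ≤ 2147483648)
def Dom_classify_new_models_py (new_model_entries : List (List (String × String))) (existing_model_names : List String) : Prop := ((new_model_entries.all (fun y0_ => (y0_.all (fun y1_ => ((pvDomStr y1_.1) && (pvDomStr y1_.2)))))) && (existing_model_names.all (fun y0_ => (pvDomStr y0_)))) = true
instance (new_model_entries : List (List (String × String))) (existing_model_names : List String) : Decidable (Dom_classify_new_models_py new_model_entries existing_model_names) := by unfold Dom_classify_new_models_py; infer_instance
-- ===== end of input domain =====

-- B replaces A's single pass with a mutating family set by a dedup dict, a precomputed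
-- first-of-family table and two stateless list comprehensions (objective: alternative decomposition).

-- ===== PORT A =====
-- module constant _HF_SUFFIXES = sorted([...], key=len, reverse=True)
def pvHFSuffixes : List String :=
  PySem.List.sorted
    ["ForCausalLM", "ForConditionalGeneration", "ForSequenceClassification",
     "ForTokenClassification", "ForQuestionAnswering", "ForMaskedLM",
     "ForMultipleChoice", "ForPreTraining", "ForImageClassification",
     "LMHeadModel", "DoubleHeadsModel", "WithLMHeadModel",
     "EncoderModel", "DecoderModel", "TextModel", "VisionModel",
     "AudioModel", "BaseModel", "Model"]
    (fun s => PySem.Str.len s) true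

-- the 'for suffix in _HF_SUFFIXES' loop of _model_family
def pvFamilyLoop (name : String) : List String → String
  | [] => name
  | s :: rest =>
    if PySem.Str.endswith name s && decide (PySem.Str.len s < PySem.Str.len name) then
      PySem.Str.slice name none (some (-(PySem.Str.len s)))   -- name[:-len(suffix)]
    else pvFamilyLoop name rest

-- helper _model_family (shared module helper, used by both Pythons)
def model_family_py (name : String) : String := pvFamilyLoop name pvHFSuffixes

-- entry["name"] (total via getD ""; the KeyError case is excluded by Pre_)
def pvName (e : List (String × String)) : String := ((PySem.Dict.mk e).get? "name").getD ""

-- A's single for-loop over the sorted entries, carrying (seen, existing_families, new_families, new_configs)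
def pvALoop (l : List (List (String × String))) (seen fams : PySem.Set String)
    (nf nc : List (List (String × String))) :
    (List (List (String × String))) × (List (List (String × String))) :=
  match l with
  | [] => (nf, nc)
  | e :: t =>
    if PySem.Set.contains seen (pvName e) then pvALoop t seen fams nf nc
    else
      if PySem.Set.contains fams (model_family_py (pvName e)) then
        pvALoop t (PySem.Set.add seen (pvName e)) fams nf (nc ++ [e])
      else
        pvALoop t (PySem.Set.add seen (pvName e))
          (PySem.Set.add fams (model_family_py (pvName e))) (nf ++ [e]) nc

def classify_new_models_py (new_model_entries : List (List (String × String)))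
    (existing_model_names : List String) :
    (List (List (String × String))) × (List (List (String × String))) :=
  let existing_families : PySem.Set String :=
    PySem.Set.ofList (existing_model_names.map model_family_py)
  pvALoop (PySem.List.sorted new_model_entries (fun e => pvName e) false)
    PySem.Set.empty existing_families [] []

-- ===== PORT B =====
def classify_new_models_py_alt (new_model_entries : List (List (String × String)))
    (existing_model_names : List String) :
    (List (List (String × String))) × (List (List (String × String))) :=
  let existing_families : PySem.Set String :=
    PySem.Set.ofList (existing_model_names.map model_family_py)
  let by_name : PySem.Dict String (List (String × String)) :=
    (PySem.List.sorted new_model_entries (fun e => pvName e) false).foldl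
      (fun d e => d.setdefault (pvName e) e) PySem.Dict.empty
  let entries := by_name.values
  let first_of_family : PySem.Dict String String :=
    entries.foldl (fun d e => d.setdefault (model_family_py (pvName e)) (pvName e))
      PySem.Dict.empty
  (entries.filter (fun e =>
      !(PySem.Set.contains existing_families (model_family_py (pvName e))) &&
        (((first_of_family.get? (model_family_py (pvName e))).getD "") == pvName e)),
   entries.filter (fun e =>
      PySem.Set.contains existing_families (model_family_py (pvName e)) ||
        !(((first_of_family.get? (model_family_py (pvName e))).getD "") == pvName e)))

-- ===== PRECONDITION & SPEC =====
-- Pre_ excludes exactly the entries without a "name" key, on which A raises KeyError.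
def Pre_classify_new_models_py (new_model_entries : List (List (String × String))) (existing_model_names : List String) : Prop :=
  ∀ e ∈ new_model_entries, (PySem.Dict.mk e).contains "name" = true
instance (new_model_entries : List (List (String × String))) (existing_model_names : List String) : Decidable (Pre_classify_new_models_py new_model_entries existing_model_names) := by unfold Pre_classify_new_models_py; infer_instance

def pvWitness_classify_new_models_py : (List (List (String × String))) × List String :=
  ([[("name", "LlamaForCausalLM")], [("name", "BertModel")]], ["BertForMaskedLM"])

def Spec_classify_new_models_py (new_model_entries : List (List (String × String))) (existing_model_names : List String) (out : (List (List (String × String))) × (List (List (String × String)))) : Prop := out = classify_new_models_py_alt new_model_entries existing_model_names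
instance (new_model_entries : List (List (String × String))) (existing_model_names : List String) (out : (List (List (String × String))) × (List (List (String × String)))) : Decidable (Spec_classify_new_models_py new_model_entries existing_model_names out) := by unfold Spec_classify_new_models_py; infer_instance

-- ===== CLAIM (what is proved, stated in full; the proofs are below) =====
def Claim_equal_classify_new_models_py : Prop := ∀ (new_model_entries : List (List (String × String))) (existing_model_names : List String), Dom_classify_new_models_py new_model_entries existing_model_names → Pre_classify_new_models_py new_model_entries existing_model_names → Spec_classify_new_models_py new_model_entries existing_model_names (classify_new_models_py new_model_entries existing_model_names)

-- ===== LEMMAS AND PROOFS =====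

-- family of an entry
def pvFamE (e : List (String × String)) : String := model_family_py (pvName e)

-- first-occurrence-per-name dedup of a list of entries, given the names already seen
def pvDedup : List (List (String × String)) → PySem.Set String → List (List (String × String))
  | [], _ => []
  | e :: t, seen =>
    if PySem.Set.contains seen (pvName e) then pvDedup t seen
    else e :: pvDedup t (PySem.Set.add seen (pvName e))

-- A's classification loop on an already-deduplicated list (no seen set)
def pvCLoop : List (List (String × String)) → PySem.Set String →
    List (List (String × String)) → List (List (String × String)) →
    (List (List (String × String))) × (List (List (String × String)))
  | [], _, nf, nc => (nf, nc)
  | e :: t, fams, nf, nc =>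
    if PySem.Set.contains fams (pvFamE e) then pvCLoop t fams nf (nc ++ [e])
    else pvCLoop t (PySem.Set.add fams (pvFamE e)) (nf ++ [e]) nc

lemma pvALoop_eq_cloop (l : List (List (String × String))) :
    ∀ seen fams nf nc, pvALoop l seen fams nf nc = pvCLoop (pvDedup l seen) fams nf nc := by
  induction l with
  | nil => intro seen fams nf nc; rfl
  | cons e t ih =>
    intro seen fams nf nc
    by_cases hs : pvName e ∈ seen
    · simp [pvALoop, pvDedup, hs, ih]
    · by_cases hf : pvFamE e ∈ fams
      · simp [pvALoop, pvDedup, pvCLoop, hs, pvFamE, ih]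
      · simp [pvALoop, pvDedup, pvCLoop, hs, pvFamE, ih]

lemma pvContains_keys {ν : Type} (d : PySem.Dict String ν) (k : String) :
    d.contains k = true ↔ k ∈ d.keys :=
  PySem.Dict.contains_iff_mem_keys d k

lemma pvValues_app {ν : Type} (d : PySem.Dict String ν) (k : String) (v : ν)
    (h : d.contains k = false) :
    (d.insert k v).values = d.values ++ [v] ∧ (d.insert k v).keys = d.keys ++ [k] := by
  have hi := PySem.Dict.items_insert_of_not_contains d v h
  constructor
  · show (d.insert k v).items.map Prod.snd = d.items.map Prod.snd ++ [v]
    rw [hi]; simp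
  · show (d.insert k v).items.map Prod.fst = d.items.map Prod.fst ++ [k]
    rw [hi]; simp

-- B's by_name loop produces exactly the dedup-by-first-name list (values) and its names (keys)
lemma pvByName_spec (l : List (List (String × String))) :
    ∀ d : PySem.Dict String (List (String × String)),
      (l.foldl (fun d e => d.setdefault (pvName e) e) d).values = d.values ++ pvDedup l d.keys ∧
      (l.foldl (fun d e => d.setdefault (pvName e) e) d).keys = d.keys ++ (pvDedup l d.keys).map pvName := by
  induction l with
  | nil => intro d; simp [pvDedup]
  | cons e t ih =>
    intro d
    by_cases h : pvName e ∈ d.keys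
    · have hc : d.contains (pvName e) = true := (pvContains_keys d _).mpr h
      rw [List.foldl_cons, PySem.Dict.setdefault_of_contains d e hc]
      obtain ⟨ihv, ihk⟩ := ih d
      refine ⟨?_, ?_⟩
      · rw [ihv, pvDedup]; simp [h]
      · rw [ihk, pvDedup]; simp [h]
    · have hc : d.contains (pvName e) = false := by
        rcases hb : d.contains (pvName e) with _ | _
        · rfl
        · exact absurd ((pvContains_keys d _).mp hb) h
      rw [List.foldl_cons, PySem.Dict.setdefault_of_not_contains d e hc]
      obtain ⟨hv, hk⟩ := pvValues_app d (pvName e) e hc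
      obtain ⟨ihv, ihk⟩ := ih (d.insert (pvName e) e)
      have hadd : PySem.Set.add d.keys (pvName e) = d.keys ++ [pvName e] :=
        PySem.Set.add_of_not_mem h
      refine ⟨?_, ?_⟩
      · rw [ihv, hv, hk, pvDedup]; simp [h]
      · rw [ihk, hk, pvDedup]; simp [h]

-- first_of_family lookup = name of the first entry of that family
lemma pvFof_spec (l : List (List (String × String))) :
    ∀ (d : PySem.Dict String String) (f : String),
      (l.foldl (fun d e => d.setdefault (pvFamE e) (pvName e)) d).get? f =
        (if d.contains f then d.get? f else (l.find? (fun e => pvFamE e == f)).map pvName) := by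
  induction l with
  | nil =>
    intro d f
    rcases h : d.contains f with _ | _
    · simp [(PySem.Dict.get?_eq_none_iff_contains d f).mpr h]
    · simp [h]
  | cons e t ih =>
    intro d f
    rw [List.foldl_cons, ih]
    by_cases hef : pvFamE e = f
    · subst hef
      rcases h : d.contains (pvFamE e) with _ | _
      · rw [PySem.Dict.setdefault_of_not_contains d (pvName e) h]
        simp [PySem.Dict.contains_insert_self, PySem.Dict.get?_insert_self]
      · rw [PySem.Dict.setdefault_of_contains d (pvName e) h]
        simp [h]
    · have hne : (pvFamE e == f) = false := by simp [hef]
      rcases h : d.contains (pvFamE e) with _ | _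
      · rw [PySem.Dict.setdefault_of_not_contains d (pvName e) h]
        have hcc : (d.insert (pvFamE e) (pvName e)).contains f = d.contains f := by
          rw [PySem.Dict.contains_insert]
          simp [Ne.symm hef]
        rw [hcc, PySem.Dict.get?_insert_of_ne _ _ (Ne.symm hef)]
        simp [hne]
      · rw [PySem.Dict.setdefault_of_contains d (pvName e) h]
        simp [hne]

-- dedup produces entries whose names avoid the seen set, without duplicates
lemma pvDedup_not_seen (l : List (List (String × String))) :
    ∀ seen e, e ∈ pvDedup l seen → ¬ (pvName e ∈ seen) := by
  induction l with
  | nil => intro seen e h; simp [pvDedup] at h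
  | cons x t ih =>
    intro seen e h
    rw [pvDedup] at h
    by_cases hs : pvName x ∈ seen
    · simp [hs] at h; exact ih seen e h
    · simp [hs] at h
      rcases h with h | h
      · subst h; exact hs
      · intro hm
        exact ih _ e h (by simp [PySem.Set.mem_add, hm])

lemma pvDedup_names_nodup (l : List (List (String × String))) :
    ∀ seen, ((pvDedup l seen).map pvName).Nodup := by
  induction l with
  | nil => intro seen; simp [pvDedup]
  | cons x t ih =>
    intro seen
    rw [pvDedup]
    by_cases hs : pvName x ∈ seen
    · rw [if_pos ((PySem.Set.contains_iff _ _).mpr hs)]; exact ih seen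
    · rw [if_neg (fun hc => hs ((PySem.Set.contains_iff _ _).mp hc))]
      simp only [List.map_cons, List.nodup_cons]
      refine ⟨?_, ih _⟩
      intro hm
      obtain ⟨e, he, hne⟩ := List.mem_map.mp hm
      exact pvDedup_not_seen t _ e he (by simp [hne.symm])

-- the classification predicate B uses, relative to a full deduplicated list D and existing set E
def pvIsFam (D : List (List (String × String))) (E : PySem.Set String)
    (e : List (String × String)) : Bool :=
  !(PySem.Set.contains E (pvFamE e)) &&
    ((((D.foldl (fun d e => d.setdefault (pvFamE e) (pvName e)) PySem.Dict.empty).get?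
        (pvFamE e)).getD "") == pvName e)

-- main invariant: A's loop over the deduplicated list equals B's stateless classification
lemma pvCLoop_spec (D : List (List (String × String))) (E : PySem.Set String)
    (hnd : (D.map pvName).Nodup) :
    ∀ (l P : List (List (String × String))), D = P ++ l →
    ∀ fams, (∀ f, f ∈ fams ↔ (f ∈ E ∨ ∃ p ∈ P, pvFamE p = f)) →
    ∀ nf nc, pvCLoop l fams nf nc =
      (nf ++ l.filter (pvIsFam D E), nc ++ l.filter (fun e => !(pvIsFam D E e))) := by
  intro l
  induction l with
  | nil => intro P hD fams hinv nf nc; simp [pvCLoop]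
  | cons e t ih =>
    intro P hD fams hinv nf nc
    have hfof : ((D.foldl (fun d e => d.setdefault (pvFamE e) (pvName e)) PySem.Dict.empty).get?
        (pvFamE e)) = (D.find? (fun p => pvFamE p == pvFamE e)).map pvName := by
      rw [pvFof_spec]
      simp [PySem.Dict.contains_empty]
    rw [pvCLoop]
    by_cases hc : pvFamE e ∈ fams
    · -- e is classified as a new config
      have hc' : PySem.Set.contains fams (pvFamE e) = true := (PySem.Set.contains_iff _ _).mpr hc
      have hfalse : pvIsFam D E e = false := by
        rcases (hinv (pvFamE e)).mp hc with hE | ⟨q, hqP, hq⟩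
        · simp [pvIsFam]
          exact fun h => absurd hE h
        · -- an earlier entry of the same family exists, so e is not the first of its family
          have hsome : (P.find? (fun p => pvFamE p == pvFamE e)).isSome := by
            rw [List.find?_isSome]
            exact ⟨q, hqP, by simp [hq]⟩
          obtain ⟨q0, hq0⟩ := Option.isSome_iff_exists.mp hsome
          have hq0P : q0 ∈ P := List.mem_of_find?_eq_some hq0
          have hfind : D.find? (fun p => pvFamE p == pvFamE e) = some q0 := by
            rw [hD, List.find?_append, hq0]; rfl
          have hdisj : (P.map pvName).Disjoint ((e :: t).map pvName) := by
            rw [hD, List.map_append] at hnd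
            exact List.disjoint_of_nodup_append hnd
          have hne : pvName q0 ≠ pvName e := by
            intro hEq
            exact hdisj (List.mem_map_of_mem hq0P) (by simp [← hEq])
          simp [pvIsFam, hfof, hfind, hne]
      rw [if_pos hc']
      rw [ih (P ++ [e]) (by simpa [List.append_assoc] using hD) fams ?_ nf (nc ++ [e])]
      · rw [List.filter_cons, List.filter_cons]
        simp [hfalse]
      · intro f
        rw [hinv f]
        constructor
        · rintro (hE | ⟨p, hp, hpf⟩)
          · exact Or.inl hE
          · exact Or.inr ⟨p, by simp [hp], hpf⟩
        · rintro (hE | ⟨p, hp, hpf⟩)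
          · exact Or.inl hE
          · rcases List.mem_append.mp hp with hp | hp
            · exact Or.inr ⟨p, hp, hpf⟩
            · simp at hp
              subst hp
              exact (hinv f).mp (hpf ▸ hc)
    · -- e is classified as a new family
      have hc' : PySem.Set.contains fams (pvFamE e) = false := by
        rcases hb : PySem.Set.contains fams (pvFamE e) with _ | _
        · rfl
        · exact absurd ((PySem.Set.contains_iff _ _).mp hb) hc
      have hcE : pvFamE e ∉ E := fun hE => hc ((hinv (pvFamE e)).mpr (Or.inl hE))
      have hnoP : ∀ p ∈ P, pvFamE p ≠ pvFamE e := by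
        intro p hp hpe
        exact hc ((hinv (pvFamE e)).mpr (Or.inr ⟨p, hp, hpe⟩))
      have hfindP : P.find? (fun p => pvFamE p == pvFamE e) = none := by
        rw [List.find?_eq_none]
        intro p hp
        simpa using hnoP p hp
      have hfind : D.find? (fun p => pvFamE p == pvFamE e) = some e := by
        rw [hD, List.find?_append, hfindP, Option.none_or, List.find?_cons_of_pos (by simp)]
      have hEc : PySem.Set.contains E (pvFamE e) = false := by
        rcases hb : PySem.Set.contains E (pvFamE e) with _ | _
        · rfl
        · exact absurd ((PySem.Set.contains_iff _ _).mp hb) hcE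
      have htrue : pvIsFam D E e = true := by
        simp [pvIsFam, hfof, hfind]
        exact hcE
      rw [if_neg (fun hb => hc ((PySem.Set.contains_iff _ _).mp hb))]
      rw [ih (P ++ [e]) (by simpa [List.append_assoc] using hD)
          (PySem.Set.add fams (pvFamE e)) ?_ (nf ++ [e]) nc]
      · rw [List.filter_cons, List.filter_cons]
        simp [htrue]
      · intro f
        rw [PySem.Set.mem_add]
        constructor
        · rintro (hf | rfl)
          · rcases (hinv f).mp hf with hE | ⟨p, hp, hpf⟩
            · exact Or.inl hE
            · exact Or.inr ⟨p, by simp [hp], hpf⟩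
          · exact Or.inr ⟨e, by simp, rfl⟩
        · rintro (hE | ⟨p, hp, hpf⟩)
          · exact Or.inl ((hinv f).mpr (Or.inl hE))
          · rcases List.mem_append.mp hp with hp | hp
            · exact Or.inl ((hinv f).mpr (Or.inr ⟨p, hp, hpf⟩))
            · simp at hp
              subst hp
              exact Or.inr hpf.symm

theorem pv_main (nme : List (List (String × String))) (emn : List String) :
    classify_new_models_py nme emn = classify_new_models_py_alt nme emn := by
  have hnd := pvDedup_names_nodup (PySem.List.sorted nme (fun e => pvName e) false) PySem.Set.empty
  have hmain := pvCLoop_spec (pvDedup (PySem.List.sorted nme (fun e => pvName e) false) PySem.Set.empty)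
    (PySem.Set.ofList (emn.map model_family_py)) hnd
    (pvDedup (PySem.List.sorted nme (fun e => pvName e) false) PySem.Set.empty) [] rfl
    (PySem.Set.ofList (emn.map model_family_py)) (by intro f; simp) [] []
  have hvals : ((PySem.List.sorted nme (fun e => pvName e) false).foldl
      (fun d e => d.setdefault (pvName e) e) PySem.Dict.empty).values =
      pvDedup (PySem.List.sorted nme (fun e => pvName e) false) PySem.Set.empty := by
    have h := (pvByName_spec (PySem.List.sorted nme (fun e => pvName e) false) PySem.Dict.empty).1
    simpa using h
  have hA : classify_new_models_py nme emn =
      ((pvDedup (PySem.List.sorted nme (fun e => pvName e) false) PySem.Set.empty).filter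
        (pvIsFam (pvDedup (PySem.List.sorted nme (fun e => pvName e) false) PySem.Set.empty)
          (PySem.Set.ofList (emn.map model_family_py))),
       (pvDedup (PySem.List.sorted nme (fun e => pvName e) false) PySem.Set.empty).filter
        (fun e => !(pvIsFam (pvDedup (PySem.List.sorted nme (fun e => pvName e) false) PySem.Set.empty)
          (PySem.Set.ofList (emn.map model_family_py)) e))) := by
    show pvALoop (PySem.List.sorted nme (fun e => pvName e) false) PySem.Set.empty
      (PySem.Set.ofList (emn.map model_family_py)) [] [] = _
    rw [pvALoop_eq_cloop]
    simpa using hmain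
  rw [hA]
  show _ = (((PySem.List.sorted nme (fun e => pvName e) false).foldl
      (fun d e => d.setdefault (pvName e) e) PySem.Dict.empty).values.filter _,
    ((PySem.List.sorted nme (fun e => pvName e) false).foldl
      (fun d e => d.setdefault (pvName e) e) PySem.Dict.empty).values.filter _)
  rw [hvals]
  refine Prod.ext rfl ?_
  apply (List.filter_congr ?_).symm
  intro e _
  simp [pvIsFam, Bool.not_and, pvFamE]

-- ===== VERDICT (by name: the statement is the Claim_ definition above) =====
theorem classify_new_models_py_spec : Claim_equal_classify_new_models_py := by
  intro nme emn _ _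
  exact pv_main nme emn
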